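-- pv_equiv track=rewrite | github.com/kelvinhuang0327/number-pattern-research | tools/review_115000008.py | cold_number_predict
-- ===== SOURCE A (Python) =====
-- from collections import Counter
--
-- def cold_number_predict(history, n=6, window=100):
--     """冷號法：選近期出現最少的號碼"""
--     recent = history[-window:]
--     freq = Counter()
--     for d in recent:
--         for n_ in d['numbers']:
--             freq[n_] += 1
--
--     all_nums = list(range(1, 39))
--     sorted_nums = sorted(all_nums, key=lambda x: freq.get(x, 0))
--     return sorted_nums[:n]
-- ===== SOURCE B (Python) =====
-- def cold_number_predict(history, n=6, window=100):
--     """Cold-number pick: flatten the recent draws into one pool, count each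
--     candidate number directly with pool.count, and emit candidates grouped by
--     ascending count (each group in numeric order) instead of sorting by key."""
--     recent = history[-window:]
--     pool = []
--     for d in recent:
--         pool += d['numbers']
--     out = []
--     for c in sorted({pool.count(x) for x in range(1, 39)}):
--         out += [x for x in range(1, 39) if pool.count(x) == c]
--     return out[:n]
-- ===== Notes on version B (the rewrite author's own statement) =====
-- stated objective: alternative
-- what changed: B drops the Counter dict and the key-sort entirely: it flattens the recent draws into one pool, counts each candidate 1..38 directly in that pool, and emits candidates grouped by ascending count (each group in numeric order), which reproduces the stable sort's smallest-number-first tie-breaking.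
import Mathlib
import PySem

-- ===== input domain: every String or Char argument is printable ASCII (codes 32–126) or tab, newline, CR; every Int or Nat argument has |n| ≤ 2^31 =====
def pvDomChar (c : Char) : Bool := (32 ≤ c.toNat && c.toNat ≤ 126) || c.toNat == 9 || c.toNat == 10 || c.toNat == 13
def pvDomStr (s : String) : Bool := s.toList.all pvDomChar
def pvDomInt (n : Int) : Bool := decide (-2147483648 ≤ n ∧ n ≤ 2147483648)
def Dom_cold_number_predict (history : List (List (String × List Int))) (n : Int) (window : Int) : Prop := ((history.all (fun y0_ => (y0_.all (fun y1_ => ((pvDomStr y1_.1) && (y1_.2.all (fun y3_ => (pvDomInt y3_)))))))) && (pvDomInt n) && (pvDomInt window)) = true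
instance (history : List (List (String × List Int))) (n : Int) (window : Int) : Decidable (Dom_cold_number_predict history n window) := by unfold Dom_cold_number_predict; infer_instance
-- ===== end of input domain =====

-- B drops A's Counter dict and key-sort: it flattens the recent draws into one pool, counts each
-- candidate 1..38 directly in the pool, and emits candidates grouped by ascending count; same exact result.

-- ===== PORT A =====
-- d['numbers'] raises KeyError when the key is absent; Pre_ excludes exactly those inputs,
-- the port reads the lookup with a [] default only to stay total outside Pre_.
def cold_number_predict (history : List (List (String × List Int))) (n : Int) (window : Int) : List Int :=
  let recent := PySem.List.slice history (some (-window)) none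
  let freq : PySem.Dict Int Int :=
    recent.foldl (fun fr rec =>
      (((PySem.Dict.mk rec).get? "numbers").getD []).foldl
        (fun fr x => fr.modify x 0 (· + 1)) fr) PySem.Dict.empty
  let all_nums := PySem.List.pyRange 1 39
  let sorted_nums := PySem.List.sorted all_nums (fun x => freq.getD x 0)
  PySem.List.slice sorted_nums none (some n)

-- ===== PORT B =====
-- (same KeyError totalisation as in port A; Pre_ excludes those inputs)
def cold_number_predict_alt (history : List (List (String × List Int))) (n : Int) (window : Int) : List Int :=
  let recent := PySem.List.slice history (some (-window)) none
  let pool : List Int :=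
    recent.foldl (fun p rec => p ++ (((PySem.Dict.mk rec).get? "numbers").getD [])) []
  let cs := PySem.Set.ofList ((PySem.List.pyRange 1 39).map (fun x => (PySem.List.count pool x : Int)))
  let out :=
    (PySem.List.sorted cs (fun c => c)).foldl
      (fun acc c => acc ++ (PySem.List.pyRange 1 39).filter
        (fun x => (PySem.List.count pool x : Int) == c)) []
  PySem.List.slice out none (some n)

-- ===== PRECONDITION & SPEC =====
-- Pre_ excludes exactly the inputs on which A raises KeyError: a record inside the
-- history[-window:] slice without a 'numbers' key (B raises there too).
def Pre_cold_number_predict (history : List (List (String × List Int))) (n : Int) (window : Int) : Prop :=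
  ∀ rec ∈ PySem.List.slice history (some (-window)) none, ((PySem.Dict.mk rec).contains "numbers") = true
instance (history : List (List (String × List Int))) (n : Int) (window : Int) : Decidable (Pre_cold_number_predict history n window) := by unfold Pre_cold_number_predict; infer_instance

def pvWitness_cold_number_predict : (List (List (String × List Int))) × Int × Int :=
  ([[("numbers", [7, 7, 3])], [("numbers", [3, 8])]], 6, 100)

def Spec_cold_number_predict (history : List (List (String × List Int))) (n : Int) (window : Int) (out : List Int) : Prop := out = cold_number_predict_alt history n window
instance (history : List (List (String × List Int))) (n : Int) (window : Int) (out : List Int) : Decidable (Spec_cold_number_predict history n window out) := by unfold Spec_cold_number_predict; infer_instance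

-- ===== CLAIM (what is proved, stated in full; the proofs are below) =====
def Claim_equal_cold_number_predict : Prop := ∀ (history : List (List (String × List Int))) (n : Int) (window : Int), Dom_cold_number_predict history n window → Pre_cold_number_predict history n window → Spec_cold_number_predict history n window (cold_number_predict history n window)

-- ===== LEMMAS AND PROOFS =====

-- A's Counter fold over the records equals one counting fold over the flattened pool.
theorem foldl_counter_flatMap (recs : List (List (String × List Int))) :
    ∀ (d : PySem.Dict Int Int),
    recs.foldl (fun fr rec =>
      (((PySem.Dict.mk rec).get? "numbers").getD []).foldl
        (fun fr x => fr.modify x 0 (· + 1)) fr) d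
    = (recs.flatMap (fun rec => ((PySem.Dict.mk rec).get? "numbers").getD [])).foldl
        (fun fr x => fr.modify x 0 (· + 1)) d := by
  induction recs with
  | nil => intro d; rfl
  | cons r rs ih =>
    intro d
    simp only [List.foldl_cons, List.flatMap_cons, List.foldl_append]
    exact ih _

-- A's frequency lookup equals B's direct count in the flattened pool.
theorem freq_getD_eq_count (recs : List (List (String × List Int))) (x : Int) :
    (recs.foldl (fun fr rec =>
      (((PySem.Dict.mk rec).get? "numbers").getD []).foldl
        (fun fr x => fr.modify x 0 (· + 1)) fr) (PySem.Dict.empty : PySem.Dict Int Int)).getD x 0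
    = (PySem.List.count (recs.flatMap (fun rec => ((PySem.Dict.mk rec).get? "numbers").getD [])) x : Int) := by
  rw [foldl_counter_flatMap recs PySem.Dict.empty, PySem.Dict.getD_foldl_modify_add_one, PySem.List.count_eq]
  simp [PySem.Dict.getD, PySem.Dict.get?, PySem.Dict.empty]

-- The order a stable sort by `key` realises on a strictly increasing input list:
-- ascending key, ties broken by the element itself.
def stKey (key : Int → Int) (a b : Int) : Prop := key a < key b ∨ (key a = key b ∧ a ≤ b)

theorem insertBy_pairwise (key : Int → Int) (x : Int) (acc : List Int)
    (hacc : acc.Pairwise (stKey key)) (hlt : ∀ y ∈ acc, y < x) :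
    (PySem.List.insertBy (fun a b => decide (key a < key b)) x acc).Pairwise (stKey key) := by
  induction acc with
  | nil => simp [PySem.List.insertBy, stKey]
  | cons y ys ih =>
    rw [List.pairwise_cons] at hacc
    obtain ⟨hy, hys⟩ := hacc
    simp only [PySem.List.insertBy]
    by_cases h : key x < key y
    · simp only [h, decide_true, if_true]
      refine List.Pairwise.cons ?_ (List.Pairwise.cons hy hys)
      intro z hz
      rw [List.mem_cons] at hz
      rcases hz with rfl | hz
      · exact Or.inl h
      · have := hy z hz
        rcases this with h2 | ⟨h2, _⟩
        · exact Or.inl (lt_trans h h2)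
        · exact Or.inl (h2 ▸ h)
    · simp only [h, decide_false]
      refine List.Pairwise.cons ?_ (ih hys (fun z hz => hlt z (List.mem_cons_of_mem _ hz)))
      intro z hz
      rw [PySem.List.mem_insertBy] at hz
      rcases hz with rfl | hz
      · rcases lt_or_eq_of_le (Int.not_lt.mp h) with h2 | h2
        · exact Or.inl h2
        · exact Or.inr ⟨h2, le_of_lt (hlt y List.mem_cons_self)⟩
      · exact hy z hz

theorem foldl_insertBy_pairwise (key : Int → Int) (xs : List Int) : ∀ (acc : List Int),
    acc.Pairwise (stKey key) →
    (∀ y ∈ acc, ∀ z ∈ xs, y < z) →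
    xs.Pairwise (· < ·) →
    (xs.foldl (fun acc x => PySem.List.insertBy (fun a b => decide (key a < key b)) x acc) acc).Pairwise (stKey key) := by
  induction xs with
  | nil => intro acc hacc _ _; simpa using hacc
  | cons x xs ih =>
    intro acc hacc hsep hxs
    rw [List.pairwise_cons] at hxs
    obtain ⟨hx, hxs⟩ := hxs
    simp only [List.foldl_cons]
    apply ih
    · exact insertBy_pairwise key x acc hacc (fun y hy => hsep y hy x List.mem_cons_self)
    · intro y hy z hz
      rw [PySem.List.mem_insertBy] at hy
      rcases hy with rfl | hy
      · exact hx z hz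
      · exact hsep y hy z (List.mem_cons_of_mem _ hz)
    · exact hxs

theorem sorted_pairwise_stKey (key : Int → Int) (xs : List Int) (hxs : xs.Pairwise (· < ·)) :
    (PySem.List.sorted xs key).Pairwise (stKey key) := by
  rw [PySem.List.sorted_eq_foldl_insertBy]
  exact foldl_insertBy_pairwise key xs [] (by simp) (by simp) hxs

theorem flatMap_filter_perm (key : Int → Int) (fs : List Int) : ∀ (xs : List Int),
    fs.Nodup → (∀ x ∈ xs, key x ∈ fs) →
    (fs.flatMap (fun f => xs.filter (fun x => key x == f))).Perm xs := by
  induction fs with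
  | nil =>
    intro xs _ hcov
    cases xs with
    | nil => simp
    | cons x xs => exact absurd (hcov x List.mem_cons_self) (by simp)
  | cons f fs ih =>
    intro xs hnd hcov
    rw [List.nodup_cons] at hnd
    obtain ⟨hf, hnd⟩ := hnd
    simp only [List.flatMap_cons]
    have hrw : ∀ g ∈ fs, xs.filter (fun x => key x == g)
        = (xs.filter (fun x => !(key x == f))).filter (fun x => key x == g) := by
      intro g hg
      rw [List.filter_filter]
      apply List.filter_congr
      intro x _
      by_cases h : key x == g
      · have : ¬ (key x == f) := by
          simp only [beq_iff_eq] at h ⊢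
          intro hc; exact hf (by rw [← hc, h]; exact hg)
        simp [h, this]
      · simp [h]
    have hfl : fs.flatMap (fun g => xs.filter (fun x => key x == g))
        = fs.flatMap (fun g => (xs.filter (fun x => !(key x == f))).filter (fun x => key x == g)) := by
      simp only [List.flatMap]
      congr 1
      exact List.map_congr_left hrw
    rw [hfl]
    have hperm := ih (xs.filter (fun x => !(key x == f))) hnd (by
      intro x hx
      rw [List.mem_filter] at hx
      have := hcov x hx.1
      rw [List.mem_cons] at this
      rcases this with h | h
      · have h2 := hx.2; simp [h] at h2
      · exact h)
    exact (hperm.append_left _).trans (by simpa using List.filter_append_perm (fun x => key x == f) xs)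

theorem flatMap_filter_pairwise (key : Int → Int) (fs : List Int) (xs : List Int)
    (hfs : fs.Pairwise (· < ·)) (hxs : xs.Pairwise (· < ·)) :
    (fs.flatMap (fun f => xs.filter (fun x => key x == f))).Pairwise (stKey key) := by
  induction fs with
  | nil => simp
  | cons f fs ih =>
    rw [List.pairwise_cons] at hfs
    obtain ⟨hf, hfs⟩ := hfs
    simp only [List.flatMap_cons]
    rw [List.pairwise_append]
    refine ⟨?_, ih hfs, ?_⟩
    · refine (List.Pairwise.filter _ hxs).imp_of_mem ?_
      intro a b ha hb hab
      rw [List.mem_filter, beq_iff_eq] at ha hb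
      exact Or.inr ⟨ha.2.trans hb.2.symm, le_of_lt hab⟩
    · intro a ha b hb
      rw [List.mem_filter, beq_iff_eq] at ha
      rw [List.mem_flatMap] at hb
      obtain ⟨g, hg, hbg⟩ := hb
      rw [List.mem_filter, beq_iff_eq] at hbg
      exact Or.inl (ha.2 ▸ hbg.2 ▸ hf g hg)

-- The stable sort of a strictly increasing list by `key` equals ascending-key group emission.
theorem sorted_eq_groups (key : Int → Int) (xs : List Int) (hxs : xs.Pairwise (· < ·)) :
    PySem.List.sorted xs key =
      (PySem.List.sorted (PySem.Set.ofList (xs.map key)) (fun f => f)).flatMap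
        (fun f => xs.filter (fun x => key x == f)) := by
  set fs := PySem.List.sorted (PySem.Set.ofList (xs.map key)) (fun f => f) with hfs
  have hndfs : fs.Nodup := (PySem.List.sorted_perm _ _ _).nodup_iff.mpr (PySem.Set.nodup_ofList _)
  have hcov : ∀ x ∈ xs, key x ∈ fs := by
    intro x hx
    rw [hfs, PySem.List.mem_sorted, PySem.Set.mem_ofList]
    exact List.mem_map_of_mem hx
  have hperm : (PySem.List.sorted xs key).Perm (fs.flatMap (fun f => xs.filter (fun x => key x == f))) :=
    (PySem.List.sorted_perm _ _ _).trans (flatMap_filter_perm key fs xs hndfs hcov).symm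
  refine List.Perm.eq_of_pairwise ?_ (sorted_pairwise_stKey key xs hxs)
    (flatMap_filter_pairwise key fs xs (PySem.List.sorted_ofList_pairwise_lt _) hxs) hperm
  intro a b _ _ h1 h2
  unfold stKey at h1 h2
  rcases h1 with h1 | h1 <;> rcases h2 with h2 | h2 <;> omega

-- ===== VERDICT (by name: the statement is the Claim_ definition above) =====
theorem cold_number_predict_spec : Claim_equal_cold_number_predict := by
  intro history n window _ _
  unfold Spec_cold_number_predict cold_number_predict cold_number_predict_alt
  simp only [PySem.List.foldl_append_eq_flatMap, List.nil_append]
  simp only [freq_getD_eq_count]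
  rw [sorted_eq_groups _ _ (PySem.List.pairwise_lt_pyRange_one 1 39)]
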